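-- pv_equiv track=rewrite | github.com/AliMuhammadAsad/Kattis-Solutions | src/particles.py | charge
-- ===== SOURCE A (Python) =====
-- import heapq
--
-- def charge(n, charges):
--     pq = []
--     for charge in charges:
--         heapq.heappush(pq, charge)
--
--     while len(pq) > 1:
--         smallest = heapq.heappop(pq)
--         if len(pq) > 0:
--             adjacent = heapq.heappop(pq)
--             combined = smallest + adjacent
--             heapq.heappush(pq, combined)
--
--     return pq[0]
-- ===== SOURCE B (Python) =====
-- def charge(n, charges):
--     return sum(charges)
-- ===== Notes on version B (the rewrite author's own statement) =====
-- stated objective: faster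
-- what changed: Replaced the heap-based pairwise merging loop with a single sum, since each merge preserves the total sum.
import Mathlib
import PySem

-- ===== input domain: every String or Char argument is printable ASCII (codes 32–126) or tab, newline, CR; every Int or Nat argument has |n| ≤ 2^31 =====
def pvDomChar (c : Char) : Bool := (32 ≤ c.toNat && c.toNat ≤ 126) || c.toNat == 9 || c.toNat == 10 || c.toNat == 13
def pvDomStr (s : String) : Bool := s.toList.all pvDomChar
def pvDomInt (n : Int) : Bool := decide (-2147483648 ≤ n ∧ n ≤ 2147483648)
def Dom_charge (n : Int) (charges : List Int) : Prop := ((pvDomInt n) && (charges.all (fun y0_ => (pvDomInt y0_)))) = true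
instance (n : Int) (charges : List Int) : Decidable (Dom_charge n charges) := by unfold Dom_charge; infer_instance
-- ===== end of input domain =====

-- B replaces the heap merging loop with one sum (each merge preserves the total); equivalence on nonempty lists.

-- ===== PORT A =====
-- heappop: return the smallest element and the remaining heap contents (first minimal element).
def popMin : List Int → Int × List Int
  | [] => (0, [])
  | [x] => (x, [])
  | x :: y :: r =>
      let (m, rest) := popMin (y :: r)
      if x ≤ m then (x, y :: r) else (m, x :: rest)

theorem popMin_length : ∀ (x : Int) (xs : List Int), (popMin (x :: xs)).2.length = xs.length := by
  intro x xs
  induction xs generalizing x with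
  | nil => simp [popMin]
  | cons y r ih =>
      simp only [popMin]
      have h := ih y
      cases hp : popMin (y :: r) with
      | mk m rest =>
          simp only [hp] at h ⊢
          split <;> simp [h]

-- the while-loop of A: pop two smallest, push their sum, until one element remains
def chargeLoop : List Int → Int
  | [] => 0  -- unreachable under Pre_charge (Python raises IndexError on empty input)
  | [x] => x
  | x :: y :: r =>
      let p1 := popMin (x :: y :: r)
      let p2 := popMin p1.2
      chargeLoop ((p1.1 + p2.1) :: p2.2)
  termination_by pq => pq.length
  decreasing_by
    have h1 := popMin_length x (y :: r)
    cases hp : popMin (x :: y :: r) with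
    | mk m rest =>
        simp only [hp] at h1
        cases rest with
        | nil => simp at h1
        | cons a as =>
            have h2 := popMin_length a as
            simp_all

def charge (n : Int) (charges : List Int) : Int := chargeLoop charges

-- ===== PORT B =====
def charge_alt (n : Int) (charges : List Int) : Int := charges.sum

-- ===== PRECONDITION & SPEC =====
-- Pre_ excludes the empty list, on which A raises IndexError.
def Pre_charge (n : Int) (charges : List Int) : Prop := charges ≠ []
instance (n : Int) (charges : List Int) : Decidable (Pre_charge n charges) := by unfold Pre_charge; infer_instance
def pvWitness_charge : Int × List Int := (3, [5, -2, 7])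

def Spec_charge (n : Int) (charges : List Int) (out : Int) : Prop := out = charge_alt n charges
instance (n : Int) (charges : List Int) (out : Int) : Decidable (Spec_charge n charges out) := by unfold Spec_charge; infer_instance

-- ===== CLAIM (what is proved, stated in full; the proofs are below) =====
def Claim_equal_charge : Prop := ∀ (n : Int) (charges : List Int), Dom_charge n charges → Pre_charge n charges → Spec_charge n charges (charge n charges)

-- ===== LEMMAS AND PROOFS =====
theorem popMin_sum : ∀ (x : Int) (xs : List Int), (popMin (x :: xs)).1 + (popMin (x :: xs)).2.sum = (x :: xs).sum := by
  intro x xs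
  induction xs generalizing x with
  | nil => simp [popMin]
  | cons y r ih =>
      simp only [popMin]
      have h := ih y
      cases hp : popMin (y :: r) with
      | mk m rest =>
          simp only [hp] at h ⊢
          split <;> simp_all <;> ring_nf <;> omega

theorem chargeLoop_sum_aux : ∀ (k : Nat) (pq : List Int), pq.length ≤ k → pq ≠ [] → chargeLoop pq = pq.sum := by
  intro k
  induction k with
  | zero =>
      intro pq hlen hne
      cases pq with
      | nil => exact absurd rfl hne
      | cons x xs => simp at hlen
  | succ k ih =>
      intro pq hlen hne
      rcases pq with _ | ⟨x, _ | ⟨y, r⟩⟩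
      · exact absurd rfl hne
      · simp [chargeLoop]
      · rw [chargeLoop]
        have h1 := popMin_sum x (y :: r)
        have hl1 := popMin_length x (y :: r)
        cases hp : popMin (x :: y :: r) with
        | mk m rest =>
            simp only [hp] at h1 hl1 ⊢
            cases rest with
            | nil => simp at hl1
            | cons a as =>
                have h2 := popMin_sum a as
                have hl2 := popMin_length a as
                have has : as.length = r.length := by simp at hl1; omega
                rw [ih _ (by simp at hlen ⊢; omega) (by simp)]
                simp only [List.sum_cons] at h1 h2 ⊢
                omega

theorem chargeLoop_sum (pq : List Int) (hne : pq ≠ []) : chargeLoop pq = pq.sum :=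
  chargeLoop_sum_aux pq.length pq le_rfl hne

-- ===== VERDICT (by name: the statement is the Claim_ definition above) =====
theorem charge_spec : Claim_equal_charge := by
  intro n charges _ hpre
  unfold Spec_charge charge charge_alt
  exact chargeLoop_sum charges hpre
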